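-- pv_equiv track=rewrite | github.com/sheepjun0330/wmdp-main | scripts/summarize_grid_search_metrics.py | parse_run_name_params
-- ===== SOURCE A (Python) =====
-- PARAM_PREFIXES = (
--     ("seed", "seed"),
--     ("alpha", "alpha"),
--     ("sc", "steering_coeffs"),
--     ("flr", "forget_lr"),
--     ("rlr", "retain_lr"),
--     ("jlr", "joint_lr"),
--     ("frho", "forget_rho"),
--     ("rrho", "retain_rho"),
--     ("tau", "tau"),
--     ("llr", "lambda_lr"),
--     ("initL", "lambda_init"),
--     ("almrho", "alm_rho"),
--     ("beta", "beta"),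
--     ("gamma", "gamma"),
--     ("fscale", "forget_scale"),
--     ("rlam", "retain_lambda"),
--     ("wd", "weight_decay"),
-- )
--
-- def normalize_param_value(value: str) -> str:
--     return value.replace("x", ",")
--
-- def parse_run_name_params(run_name: str) -> dict[str, str]:
--     params: dict[str, str] = {}
--     for token in run_name.split("_"):
--         for prefix, key in PARAM_PREFIXES:
--             if token.startswith(prefix):
--                 params[key] = normalize_param_value(token[len(prefix) :])
--                 break
--     return params
-- ===== SOURCE B (Python) =====
-- PARAM_PREFIXES = (
--     ("seed", "seed"),
--     ("alpha", "alpha"),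
--     ("sc", "steering_coeffs"),
--     ("flr", "forget_lr"),
--     ("rlr", "retain_lr"),
--     ("jlr", "joint_lr"),
--     ("frho", "forget_rho"),
--     ("rrho", "retain_rho"),
--     ("tau", "tau"),
--     ("llr", "lambda_lr"),
--     ("initL", "lambda_init"),
--     ("almrho", "alm_rho"),
--     ("beta", "beta"),
--     ("gamma", "gamma"),
--     ("fscale", "forget_scale"),
--     ("rlam", "retain_lambda"),
--     ("wd", "weight_decay"),
-- )
--
-- # Hash table keyed by the prefix string; since no prefix is a prefix of another,
-- # probing the table with each possible prefix length replaces the inner scan.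
-- _PREFIX_TABLE = {prefix: key for prefix, key in PARAM_PREFIXES}
-- _PREFIX_LENGTHS = sorted({len(prefix) for prefix, _ in PARAM_PREFIXES})
--
--
-- def normalize_param_value(value: str) -> str:
--     return value.replace("x", ",")
--
--
-- def parse_run_name_params(run_name: str) -> dict[str, str]:
--     params: dict[str, str] = {}
--     for token in run_name.split("_"):
--         for n in _PREFIX_LENGTHS:
--             key = _PREFIX_TABLE.get(token[:n])
--             if key is not None:
--                 params[key] = normalize_param_value(token[n:])
--                 break
--     return params
-- ===== Notes on version B (the rewrite author's own statement) =====
-- stated objective: idiomatic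
-- what changed: B replaces A's inner linear scan over the 17 (prefix, key) pairs by a precomputed hash table keyed by prefix plus the sorted set of distinct prefix lengths: each token is probed with token[:n] for the 5 possible lengths, correct because no prefix is a prefix of another.
import Mathlib
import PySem

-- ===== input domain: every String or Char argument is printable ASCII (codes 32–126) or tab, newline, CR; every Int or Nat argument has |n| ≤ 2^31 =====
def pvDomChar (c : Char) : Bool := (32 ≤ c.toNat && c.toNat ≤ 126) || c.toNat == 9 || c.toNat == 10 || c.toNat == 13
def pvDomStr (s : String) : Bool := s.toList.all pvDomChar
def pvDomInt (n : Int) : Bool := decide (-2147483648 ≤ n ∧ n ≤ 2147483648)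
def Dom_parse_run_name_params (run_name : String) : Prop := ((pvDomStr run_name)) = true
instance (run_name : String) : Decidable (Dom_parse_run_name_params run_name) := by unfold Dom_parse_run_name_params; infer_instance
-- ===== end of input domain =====

-- B replaces A's inner scan over the 17 (prefix, key) pairs by a prefix-keyed hash table
-- probed with the 5 possible prefix lengths; same result since no prefix is a prefix of another.

-- ===== PORT A =====
def pvPrefixes : List (String × String) :=
  [("seed", "seed"), ("alpha", "alpha"), ("sc", "steering_coeffs"), ("flr", "forget_lr"),
   ("rlr", "retain_lr"), ("jlr", "joint_lr"), ("frho", "forget_rho"), ("rrho", "retain_rho"),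
   ("tau", "tau"), ("llr", "lambda_lr"), ("initL", "lambda_init"), ("almrho", "alm_rho"),
   ("beta", "beta"), ("gamma", "gamma"), ("fscale", "forget_scale"), ("rlam", "retain_lambda"),
   ("wd", "weight_decay")]

def normalize_param_value (value : String) : String := PySem.Str.replace value "x" ","

-- inner 'for prefix, key in PARAM_PREFIXES: … break' loop of A
def pvInnerA (params : PySem.Dict String String) (token : String) :
    List (String × String) → PySem.Dict String String
  | [] => params
  | (pre, key) :: rest =>
    if PySem.Str.startswith token pre then
      params.insert key (normalize_param_value (PySem.Str.slice token (some (PySem.Str.len pre)) none))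
    else pvInnerA params token rest

def parse_run_name_params (run_name : String) : List (String × String) :=
  (((PySem.Str.split? run_name "_").getD []).foldl
    (fun params token => pvInnerA params token pvPrefixes) PySem.Dict.empty).items

-- ===== PORT B =====
def pvPrefixTable : PySem.Dict String String := PySem.Dict.ofList pvPrefixes

def pvPrefixLengths : List Int :=
  PySem.List.sorted (PySem.Set.ofList (pvPrefixes.map (fun pk => PySem.Str.len pk.1))) (fun x => x) false

-- inner 'for n in _PREFIX_LENGTHS: … break' loop of B
def pvInnerB (params : PySem.Dict String String) (token : String) :
    List Int → PySem.Dict String String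
  | [] => params
  | n :: rest =>
    match pvPrefixTable.get? (PySem.Str.slice token none (some n)) with
    | some key => params.insert key (normalize_param_value (PySem.Str.slice token (some n) none))
    | none => pvInnerB params token rest

def parse_run_name_params_alt (run_name : String) : List (String × String) :=
  (((PySem.Str.split? run_name "_").getD []).foldl
    (fun params token => pvInnerB params token pvPrefixLengths) PySem.Dict.empty).items

-- ===== PRECONDITION & SPEC =====
def Spec_parse_run_name_params (run_name : String) (out : List (String × String)) : Prop := out = parse_run_name_params_alt run_name
instance (run_name : String) (out : List (String × String)) : Decidable (Spec_parse_run_name_params run_name out) := by unfold Spec_parse_run_name_params; infer_instance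

-- ===== CLAIM (what is proved, stated in full; the proofs are below) =====
def Claim_equal_parse_run_name_params : Prop := ∀ (run_name : String), Dom_parse_run_name_params run_name → Spec_parse_run_name_params run_name (parse_run_name_params run_name)

-- ===== LEMMAS AND PROOFS =====

theorem pv_items_table : pvPrefixTable.items = pvPrefixes := by decide

theorem pv_table_mem {s k : String} (h : (s, k) ∈ pvPrefixes) : pvPrefixTable.get? s = some k := by
  refine PySem.Dict.get?_of_mem_items _ ?_ ?_
  · rw [pv_items_table]; exact h
  · exact PySem.Dict.nodup_keys_ofList _

theorem pv_mem_table {s k : String} (h : pvPrefixTable.get? s = some k) : (s, k) ∈ pvPrefixes := by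
  have := PySem.Dict.mem_items_of_get?_eq_some _ h
  rwa [pv_items_table] at this

-- no prefix is a prefix of a different prefix
theorem pv_no_mutual_prefix :
    ∀ x ∈ pvPrefixes, ∀ y ∈ pvPrefixes, x.1 = y.1 ∨ ¬ x.1.toList <+: y.1.toList := by decide

theorem pv_uniq {p k q j : String} {T : List Char}
    (hp : (p, k) ∈ pvPrefixes) (hq : (q, j) ∈ pvPrefixes)
    (h1 : p.toList <+: T) (h2 : q.toList <+: T) : p = q ∧ k = j := by
  have hpq : p = q := by
    rcases List.prefix_or_prefix_of_prefix h1 h2 with hh | hh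
    · rcases pv_no_mutual_prefix (p, k) hp (q, j) hq with h | h
      · exact h
      · exact absurd hh h
    · rcases pv_no_mutual_prefix (q, j) hq (p, k) hp with h | h
      · exact h.symm
      · exact absurd hh h
  subst hpq
  have e1 := pv_table_mem hp
  have e2 := pv_table_mem hq
  rw [e1] at e2
  exact ⟨rfl, Option.some_inj.mp e2⟩

theorem pv_lengths_eq : pvPrefixLengths = [2, 3, 4, 5, 6] := by decide

theorem pv_startswith_prefix {token p : String} (h : PySem.Str.startswith token p = true) :
    p.toList <+: token.toList := by
  rw [PySem.Str.startswith_eq] at h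
  exact (PySem.Chars.startswith_iff _ _).mp h

theorem pv_slice_toList (token : String) {n : Int} (hn : 0 ≤ n) :
    (PySem.Str.slice token none (some n)).toList = token.toList.take n.toNat := by
  rw [PySem.Str.toList_slice]
  exact PySem.List.slice_to _ hn

theorem pv_innerA_none (params : PySem.Dict String String) (token : String) :
    ∀ l, (∀ pk ∈ l, PySem.Str.startswith token pk.1 = false) → pvInnerA params token l = params := by
  intro l
  induction l with
  | nil => intro _; rfl
  | cons hd tl ih =>
    intro h
    obtain ⟨pre, key⟩ := hd
    have hf : PySem.Str.startswith token pre = false := h (pre, key) (by simp)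
    simp only [pvInnerA, hf, Bool.false_eq_true, if_false]
    exact ih (fun pk hpk => h pk (List.mem_cons_of_mem _ hpk))

theorem pv_innerA_some (params : PySem.Dict String String) (token p k : String)
    (hp : (p, k) ∈ pvPrefixes) (hsw : PySem.Str.startswith token p = true) :
    ∀ l, (∀ x ∈ l, x ∈ pvPrefixes) → (p, k) ∈ l →
      pvInnerA params token l =
        params.insert k (normalize_param_value (PySem.Str.slice token (some (PySem.Str.len p)) none)) := by
  intro l
  induction l with
  | nil => intro _ h; exact absurd h (List.not_mem_nil)
  | cons hd tl ih =>
    intro hsub hmem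
    obtain ⟨q, j⟩ := hd
    by_cases hq : PySem.Str.startswith token q = true
    · have hqm : (q, j) ∈ pvPrefixes := hsub (q, j) (by simp)
      obtain ⟨hpq, hkj⟩ := pv_uniq hqm hp (pv_startswith_prefix hq) (pv_startswith_prefix hsw)
      subst hpq; subst hkj
      simp only [pvInnerA, hq, if_true]
    · have hne : (p, k) ≠ (q, j) := by
        intro he
        rw [Prod.mk.injEq] at he
        exact hq (he.1 ▸ hsw)
      have hmem' : (p, k) ∈ tl := by
        rcases List.mem_cons.mp hmem with h | h
        · exact absurd h hne
        · exact h
      simp only [pvInnerA, hq, Bool.false_eq_true, if_false]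
      exact ih (fun x hx => hsub x (List.mem_cons_of_mem _ hx)) hmem'

theorem pv_get?_none_of_nomatch (token : String)
    (h : ∀ pk ∈ pvPrefixes, PySem.Str.startswith token pk.1 = false) {n : Int} (hn : 0 ≤ n) :
    pvPrefixTable.get? (PySem.Str.slice token none (some n)) = none := by
  cases heq : pvPrefixTable.get? (PySem.Str.slice token none (some n)) with
  | none => rfl
  | some j =>
    exfalso
    have hmem := pv_mem_table heq
    have hpre : (PySem.Str.slice token none (some n)).toList <+: token.toList := by
      rw [pv_slice_toList token hn]
      exact List.take_prefix _ _
    have hsw : PySem.Str.startswith token (PySem.Str.slice token none (some n)) = true := by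
      rw [PySem.Str.startswith_eq]
      exact (PySem.Chars.startswith_iff _ _).mpr hpre
    have := h _ hmem
    simp only [this] at hsw
    exact Bool.false_ne_true hsw

theorem pv_innerB_none (params : PySem.Dict String String) (token : String)
    (h : ∀ pk ∈ pvPrefixes, PySem.Str.startswith token pk.1 = false) :
    ∀ ns, (∀ n ∈ ns, 0 ≤ n) → pvInnerB params token ns = params := by
  intro ns
  induction ns with
  | nil => intro _; rfl
  | cons n rest ih =>
    intro hnn
    have h0 : (0:Int) ≤ n := hnn n (by simp)
    simp only [pvInnerB, pv_get?_none_of_nomatch token h h0]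
    exact ih (fun m hm => hnn m (List.mem_cons_of_mem _ hm))

theorem pv_innerB_skip (params : PySem.Dict String String) (token p k : String)
    (hp : (p, k) ∈ pvPrefixes) (hT : p.toList <+: token.toList)
    {n : Int} (hn0 : 0 ≤ n) (hlt : n < PySem.Str.len p) (rest : List Int) :
    pvInnerB params token (n :: rest) = pvInnerB params token rest := by
  have hnone : pvPrefixTable.get? (PySem.Str.slice token none (some n)) = none := by
    cases heq : pvPrefixTable.get? (PySem.Str.slice token none (some n)) with
    | none => rfl
    | some j =>
      exfalso
      have hmem := pv_mem_table heq
      have hpre : (PySem.Str.slice token none (some n)).toList <+: token.toList := by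
        rw [pv_slice_toList token hn0]
        exact List.take_prefix _ _
      obtain ⟨hsp, _⟩ := pv_uniq hmem hp hpre hT
      have hlen : (PySem.Str.slice token none (some n)).toList.length ≤ n.toNat := by
        rw [pv_slice_toList token hn0]
        simp [List.length_take]
      rw [hsp] at hlen
      rw [PySem.Str.len_eq] at hlt
      omega
  simp only [pvInnerB, hnone]

theorem pv_innerB_hit (params : PySem.Dict String String) (token p k : String)
    (hp : (p, k) ∈ pvPrefixes) (hT : p.toList <+: token.toList) (rest : List Int) :
    pvInnerB params token ((PySem.Str.len p) :: rest) =
      params.insert k (normalize_param_value (PySem.Str.slice token (some (PySem.Str.len p)) none)) := by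
  have hs : (PySem.Str.slice token none (some (PySem.Str.len p))).toList = p.toList := by
    rw [pv_slice_toList token (by rw [PySem.Str.len_eq]; positivity)]
    rw [PySem.Str.len_eq, Int.toNat_natCast]
    exact (List.prefix_iff_eq_take.mp hT).symm
  have hsp : PySem.Str.slice token none (some (PySem.Str.len p)) = p := String.toList_inj.mp hs
  simp only [pvInnerB, hsp, pv_table_mem hp]

theorem pv_innerB_some (params : PySem.Dict String String) (token p k : String)
    (hp : (p, k) ∈ pvPrefixes) (hT : p.toList <+: token.toList) :
    pvInnerB params token pvPrefixLengths =
      params.insert k (normalize_param_value (PySem.Str.slice token (some (PySem.Str.len p)) none)) := by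
  rw [pv_lengths_eq]
  have hall : ∀ pk ∈ pvPrefixes, PySem.Str.len pk.1 = 2 ∨ PySem.Str.len pk.1 = 3 ∨
      PySem.Str.len pk.1 = 4 ∨ PySem.Str.len pk.1 = 5 ∨ PySem.Str.len pk.1 = 6 := by decide
  rcases hall (p, k) hp with h | h | h | h | h
  · rw [show ((2:Int) :: [3, 4, 5, 6]) = (PySem.Str.len p) :: [3, 4, 5, 6] by rw [h]]
    exact pv_innerB_hit params token p k hp hT _
  · rw [pv_innerB_skip params token p k hp hT (by norm_num) (by rw [h]; norm_num) _]
    rw [show ((3:Int) :: [4, 5, 6]) = (PySem.Str.len p) :: [4, 5, 6] by rw [h]]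
    exact pv_innerB_hit params token p k hp hT _
  · rw [pv_innerB_skip params token p k hp hT (by norm_num) (by rw [h]; norm_num) _]
    rw [pv_innerB_skip params token p k hp hT (by norm_num) (by rw [h]; norm_num) _]
    rw [show ((4:Int) :: [5, 6]) = (PySem.Str.len p) :: [5, 6] by rw [h]]
    exact pv_innerB_hit params token p k hp hT _
  · rw [pv_innerB_skip params token p k hp hT (by norm_num) (by rw [h]; norm_num) _]
    rw [pv_innerB_skip params token p k hp hT (by norm_num) (by rw [h]; norm_num) _]
    rw [pv_innerB_skip params token p k hp hT (by norm_num) (by rw [h]; norm_num) _]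
    rw [show ((5:Int) :: [6]) = (PySem.Str.len p) :: [6] by rw [h]]
    exact pv_innerB_hit params token p k hp hT _
  · rw [pv_innerB_skip params token p k hp hT (by norm_num) (by rw [h]; norm_num) _]
    rw [pv_innerB_skip params token p k hp hT (by norm_num) (by rw [h]; norm_num) _]
    rw [pv_innerB_skip params token p k hp hT (by norm_num) (by rw [h]; norm_num) _]
    rw [pv_innerB_skip params token p k hp hT (by norm_num) (by rw [h]; norm_num) _]
    rw [show ((6:Int) :: ([] : List Int)) = (PySem.Str.len p) :: [] by rw [h]]
    exact pv_innerB_hit params token p k hp hT _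

theorem pv_inner_eq (params : PySem.Dict String String) (token : String) :
    pvInnerA params token pvPrefixes = pvInnerB params token pvPrefixLengths := by
  by_cases hex : ∃ pk ∈ pvPrefixes, PySem.Str.startswith token pk.1 = true
  · obtain ⟨⟨p, k⟩, hp, hsw⟩ := hex
    rw [pv_innerA_some params token p k hp hsw pvPrefixes (fun x h => h) hp]
    rw [pv_innerB_some params token p k hp (pv_startswith_prefix hsw)]
  · push Not at hex
    have hfalse : ∀ pk ∈ pvPrefixes, PySem.Str.startswith token pk.1 = false := by
      intro pk hpk
      exact Bool.not_eq_true _ ▸ Bool.eq_false_iff.mpr (fun hc => hex pk hpk hc)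
    rw [pv_innerA_none params token pvPrefixes hfalse]
    rw [pv_innerB_none params token hfalse pvPrefixLengths (by rw [pv_lengths_eq]; decide)]

-- ===== VERDICT (by name: the statement is the Claim_ definition above) =====
theorem parse_run_name_params_spec : Claim_equal_parse_run_name_params := by
  intro run_name _
  unfold Spec_parse_run_name_params parse_run_name_params parse_run_name_params_alt
  have hfun : (fun (params : PySem.Dict String String) (token : String) => pvInnerA params token pvPrefixes)
      = (fun (params : PySem.Dict String String) (token : String) => pvInnerB params token pvPrefixLengths) :=
    funext fun a => funext fun t => pv_inner_eq a t
  rw [hfun]
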